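-- pv_equiv track=rewrite | github.com/sadenkhatib/code-coach | backend/progression.py | evaluate_performance
-- ===== SOURCE A (Python) =====
-- def evaluate_performance(reps_per_set, rep_min, rep_max):
--     """
--     Classify the session as 'progress', 'maintain', or 'deload'.
--
--     Args:
--         reps_per_set (list[int]): actual reps logged for each set.
--         rep_min (int): floor of the target rep range.
--         rep_max (int): ceiling of the target rep range.
--
--     Returns:
--         str: one of 'progress', 'maintain', 'deload'.
--     """
--     if not reps_per_set:
--         return "maintain"
--
--     all_hit_ceiling = all(r >= rep_max for r in reps_per_set)
--     all_in_range    = all(r >= rep_min  for r in reps_per_set)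
--
--     if all_hit_ceiling:
--         return "progress"
--     elif all_in_range:
--         return "maintain"
--     else:
--         return "deload"
-- ===== SOURCE B (Python) =====
-- def evaluate_performance(reps_per_set, rep_min, rep_max):
--     """Classify the session by its single worst set instead of two all() scans."""
--     if not reps_per_set:
--         return "maintain"
--     worst = min(reps_per_set)
--     if worst >= rep_max:
--         return "progress"
--     if worst >= rep_min:
--         return "maintain"
--     return "deload"
-- ===== Notes on version B (the rewrite author's own statement) =====
-- stated objective: simpler
-- what changed: Replaces the two all() predicate scans with a single aggregate, the minimum rep count, and classifies by comparing that one value against the thresholds.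
import Mathlib
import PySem

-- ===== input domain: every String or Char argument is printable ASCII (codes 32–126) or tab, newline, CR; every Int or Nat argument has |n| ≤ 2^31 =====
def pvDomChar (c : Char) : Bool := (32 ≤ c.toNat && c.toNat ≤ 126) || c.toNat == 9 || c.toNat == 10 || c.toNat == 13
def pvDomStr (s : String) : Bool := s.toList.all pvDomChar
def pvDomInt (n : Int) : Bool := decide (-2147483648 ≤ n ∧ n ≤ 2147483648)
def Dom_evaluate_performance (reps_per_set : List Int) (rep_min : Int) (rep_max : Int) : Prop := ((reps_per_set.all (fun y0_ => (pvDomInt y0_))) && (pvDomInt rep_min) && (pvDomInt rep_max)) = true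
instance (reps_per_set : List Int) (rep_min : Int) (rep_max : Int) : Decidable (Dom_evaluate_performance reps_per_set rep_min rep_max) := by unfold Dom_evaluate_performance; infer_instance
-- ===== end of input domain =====

-- ===== PORT A =====
def evaluate_performance (reps_per_set : List Int) (rep_min : Int) (rep_max : Int) : String :=
  if reps_per_set = [] then "maintain"
  else
    let all_hit_ceiling := reps_per_set.all (fun r => decide (r ≥ rep_max))
    let all_in_range := reps_per_set.all (fun r => decide (r ≥ rep_min))
    if all_hit_ceiling then "progress"
    else if all_in_range then "maintain"
    else "deload"

-- ===== PORT B =====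
def evaluate_performance_alt (reps_per_set : List Int) (rep_min : Int) (rep_max : Int) : String :=
  match reps_per_set with
  | [] => "maintain"
  | h :: t =>
    let worst := t.foldl min h
    if worst ≥ rep_max then "progress"
    else if worst ≥ rep_min then "maintain"
    else "deload"

-- ===== PRECONDITION & SPEC =====
def Spec_evaluate_performance (reps_per_set : List Int) (rep_min : Int) (rep_max : Int) (out : String) : Prop := out = evaluate_performance_alt reps_per_set rep_min rep_max
instance (reps_per_set : List Int) (rep_min : Int) (rep_max : Int) (out : String) : Decidable (Spec_evaluate_performance reps_per_set rep_min rep_max out) := by unfold Spec_evaluate_performance; infer_instance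

-- ===== CLAIM (what is proved, stated in full; the proofs are below) =====
def Claim_equal_evaluate_performance : Prop := ∀ (reps_per_set : List Int) (rep_min : Int) (rep_max : Int), Dom_evaluate_performance reps_per_set rep_min rep_max → Spec_evaluate_performance reps_per_set rep_min rep_max (evaluate_performance reps_per_set rep_min rep_max)

-- ===== LEMMAS AND PROOFS =====

-- ===== VERDICT (by name: the statement is the Claim_ definition above) =====
-- the minimum of h::t is ≥ c iff every element is ≥ c
lemma foldl_min_ge (t : List Int) (h c : Int) :
    (t.foldl min h ≥ c) ↔ (h ≥ c ∧ ∀ x ∈ t, x ≥ c) := by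
  induction t generalizing h with
  | nil => simp
  | cons a t ih =>
    simp only [List.foldl_cons, ih, ge_iff_le, le_min_iff, List.mem_cons]
    constructor
    · rintro ⟨⟨hh, ha⟩, hall⟩
      exact ⟨hh, fun x hx => hx.elim (fun e => e ▸ ha) (hall x)⟩
    · rintro ⟨hh, hall⟩
      exact ⟨⟨hh, hall a (Or.inl rfl)⟩, fun x hx => hall x (Or.inr hx)⟩

theorem evaluate_performance_spec : Claim_equal_evaluate_performance := by
  intro reps mn mx _
  unfold Spec_evaluate_performance evaluate_performance evaluate_performance_alt
  cases reps with
  | nil => simp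
  | cons h t =>
    simp only [List.all_cons, if_neg (List.cons_ne_nil h t)]
    have hax := foldl_min_ge t h mx
    have han := foldl_min_ge t h mn
    by_cases c1 : t.foldl min h ≥ mx
    · rw [if_pos c1]
      obtain ⟨hh, hall⟩ := hax.mp c1
      have : (decide (h ≥ mx) && t.all fun r => decide (r ≥ mx)) = true := by
        simp [hh]; intro x hx; exact hall x hx
      simp [this]
    · rw [if_neg c1]
      have hne : (decide (h ≥ mx) && t.all fun r => decide (r ≥ mx)) = false := by
        by_contra hc
        exact c1 (hax.mpr (by simpa using Bool.of_not_eq_false hc))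
      by_cases c2 : t.foldl min h ≥ mn
      · rw [if_pos c2]
        obtain ⟨hh, hall⟩ := han.mp c2
        have : (decide (h ≥ mn) && t.all fun r => decide (r ≥ mn)) = true := by
          simp [hh]; intro x hx; exact hall x hx
        simp [hne, this]
      · rw [if_neg c2]
        have hne2 : (decide (h ≥ mn) && t.all fun r => decide (r ≥ mn)) = false := by
          by_contra hc
          exact c2 (han.mpr (by simpa using Bool.of_not_eq_false hc))
        simp [hne, hne2]
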